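-- pv_equiv track=rewrite | github.com/Dimaaap/Leetcode | Easy/3803.) Count Residue Prefixes.py | residue_prefixes
-- ===== SOURCE A (Python) =====
-- def residue_prefixes(s: str) -> int:
--     """
--     You are given a string s consisting only of lowercase English letters.
--     A prefix of s is called a residue if the number of distinct characters in the prefix is equal to len(prefix) % 3.
--     Return the count of residue prefixes in s.
--     A prefix of a string is a non-empty substring that starts from the beginning of the string and extends to
--     any point within it.
--     """
--
--     i = 0
--     count = 0
--     while i < len(s):
--         prefix = s[:i+1]
--         distinct_chars = len(set(prefix))
--         if distinct_chars == len(prefix) % 3: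
--             count += 1
--         i += 1
--     return count
-- ===== SOURCE B (Python) =====
-- def residue_prefixes(s: str) -> int:
--     seen = set()
--     count = 0
--     for i, c in enumerate(s):
--         seen.add(c)
--         if len(seen) == (i + 1) % 3:
--             count += 1
--     return count
-- ===== Notes on version B (the rewrite author's own statement) =====
-- stated objective: faster
-- what changed: Replaces the per-prefix slice-and-rebuild-set quadratic scan with a single pass that maintains the set of seen characters incrementally.
import Mathlib
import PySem

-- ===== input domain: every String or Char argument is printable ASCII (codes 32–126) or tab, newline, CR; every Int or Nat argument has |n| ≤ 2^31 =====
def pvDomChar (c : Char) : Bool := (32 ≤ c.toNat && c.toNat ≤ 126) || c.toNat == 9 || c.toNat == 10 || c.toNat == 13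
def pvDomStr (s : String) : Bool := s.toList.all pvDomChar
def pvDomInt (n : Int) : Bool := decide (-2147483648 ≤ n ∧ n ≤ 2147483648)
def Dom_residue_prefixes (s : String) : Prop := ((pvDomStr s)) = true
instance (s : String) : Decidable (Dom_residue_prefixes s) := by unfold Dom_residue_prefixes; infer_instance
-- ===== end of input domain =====

-- B replaces A's per-prefix slice + set rebuild (quadratic) with one pass maintaining the seen-set incrementally (objective: faster).

-- ===== PORT A =====
-- loop body: prefix = s[:i+1]; distinct_chars = len(set(prefix)); if distinct_chars == len(prefix) % 3: count += 1
def aStep (cs : List Char) (count : Int) (i : Int) : Int :=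
  let pref := PySem.List.slice cs none (some (i + 1))
  let distinct_chars := PySem.Set.len (PySem.Set.ofList pref)
  if distinct_chars = PySem.Int.mod (PySem.List.len pref) 3 then count + 1 else count

def residue_prefixes (s : String) : Int :=
  (PySem.List.pyRange 0 (PySem.List.len s.toList) 1).foldl (aStep s.toList) 0

-- ===== PORT B =====
-- loop body: seen.add(c); if len(seen) == (i + 1) % 3: count += 1   (state = (seen, i+1, count))
def bStep (st : PySem.Set Char × Int × Int) (c : Char) : PySem.Set Char × Int × Int :=
  let seen := PySem.Set.add st.1 c
  let n := st.2.1 + 1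
  (seen, n, if PySem.Set.len seen = PySem.Int.mod n 3 then st.2.2 + 1 else st.2.2)

def residue_prefixes_alt (s : String) : Int :=
  (s.toList.foldl bStep (PySem.Set.empty, 0, 0)).2.2

-- ===== PRECONDITION & SPEC =====
def Spec_residue_prefixes (s : String) (out : Int) : Prop := out = residue_prefixes_alt s
instance (s : String) (out : Int) : Decidable (Spec_residue_prefixes s out) := by unfold Spec_residue_prefixes; infer_instance

-- ===== CLAIM (what is proved, stated in full; the proofs are below) =====
def Claim_equal_residue_prefixes : Prop := ∀ (s : String), Dom_residue_prefixes s → Spec_residue_prefixes s (residue_prefixes s)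

-- ===== LEMMAS AND PROOFS =====

lemma ofList_snoc (ds : List Char) (c : Char) :
    PySem.Set.ofList (ds ++ [c]) = PySem.Set.add (PySem.Set.ofList ds) c := by
  simp [PySem.Set.ofList_eq_foldl, List.foldl_append]

lemma aStep_snoc_eq (ds : List Char) (c : Char) (count i : Int)
    (h0 : 0 ≤ i) (h1 : i < (ds.length : Int)) :
    aStep (ds ++ [c]) count i = aStep ds count i := by
  have hsl : PySem.List.slice (ds ++ [c]) none (some (i + 1))
      = PySem.List.slice ds none (some (i + 1)) := by
    rw [PySem.List.slice_to (ds ++ [c]) (by omega), PySem.List.slice_to ds (by omega),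
      List.take_append_of_le_length (by omega)]
  simp [aStep, hsl]

lemma fold_eq (cs : List Char) :
    cs.foldl bStep (PySem.Set.empty, 0, 0)
      = (PySem.Set.ofList cs, (cs.length : Int),
         (PySem.List.pyRange 0 (cs.length : Int) 1).foldl (aStep cs) 0) := by
  induction cs using List.reverseRecOn with
  | nil => simp [PySem.List.pyRange_one_eq_nil, PySem.Set.ofList, PySem.Set.empty]
  | append_singleton ds c ih =>
    rw [List.foldl_append, ih]
    have hn : ((ds ++ [c]).length : Int) = (ds.length : Int) + 1 := by
      simp
    have hrange : PySem.List.pyRange 0 ((ds.length : Int) + 1) 1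
        = PySem.List.pyRange 0 (ds.length : Int) 1 ++ [(ds.length : Int)] := by
      exact PySem.List.pyRange_one_succ_right (by omega)
    have hinner :
        (PySem.List.pyRange 0 (ds.length : Int) 1).foldl (aStep (ds ++ [c])) 0
          = (PySem.List.pyRange 0 (ds.length : Int) 1).foldl (aStep ds) 0 := by
      refine PySem.List.foldl_congr_mem _ _ _ _ ?_
      intro a x hx
      have := (PySem.List.mem_pyRange_one).mp hx
      exact aStep_snoc_eq ds c a x this.1 this.2
    have hlast : PySem.List.slice (ds ++ [c]) none (some ((ds.length : Int) + 1))
        = ds ++ [c] := by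
      rw [PySem.List.slice_to (ds ++ [c]) (by omega)]
      have : ((ds.length : Int) + 1).toNat = ds.length + 1 := by omega
      simp [this]
    rw [hn, hrange, List.foldl_append, hinner]
    simp only [List.foldl_cons, List.foldl_nil]
    rw [ofList_snoc]
    unfold bStep aStep
    simp [hlast, ofList_snoc]

-- ===== VERDICT (by name: the statement is the Claim_ definition above) =====
theorem residue_prefixes_spec : Claim_equal_residue_prefixes := by
  intro s _
  unfold Spec_residue_prefixes residue_prefixes residue_prefixes_alt
  rw [fold_eq]
  simp
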